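-- pv_equiv track=rewrite | github.com/tienlongoc/dancing_link | dancing_link.py | s_transform
-- ===== SOURCE A (Python) =====
-- def s_transform(sudoku_dimension, row, col, value):
--     # Sudoku dimension -- e.g. if 9x9, then dimension is 3
--     # This represents the constraint "value exists in nth square" to be used in exact cover problem
--     result = [0] * sudoku_dimension**4
--     s_map = {}
--     for i in range(sudoku_dimension):
--         tmp = {}
--         for j in range(sudoku_dimension):
--             tmp[j] = i * sudoku_dimension + j
--         s_map[i] = tmp
--     result[s_map[row//sudoku_dimension][col//sudoku_dimension] * sudoku_dimension**2 + value] = 1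
--     return result
-- ===== SOURCE B (Python) =====
-- def s_transform(sudoku_dimension, row, col, value):
--     # No lookup table and no loops: the hot column of the exact-cover constraint
--     # "value in nth square" is a closed-form function of the block coordinates.
--     square = row // sudoku_dimension * sudoku_dimension + col // sudoku_dimension
--     result = [0] * sudoku_dimension ** 4
--     result[square * sudoku_dimension ** 2 + value] = 1
--     return result
-- ===== Notes on version B (the rewrite author's own statement) =====
-- stated objective: simpler
-- what changed: B eliminates A's nested-loop construction of the s_map lookup table (a dict of dicts) and computes the hot column of the exact-cover constraint in closed form as (row//d*d + col//d)*d**2 + value; B has no loops and no dicts.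
import Mathlib
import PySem

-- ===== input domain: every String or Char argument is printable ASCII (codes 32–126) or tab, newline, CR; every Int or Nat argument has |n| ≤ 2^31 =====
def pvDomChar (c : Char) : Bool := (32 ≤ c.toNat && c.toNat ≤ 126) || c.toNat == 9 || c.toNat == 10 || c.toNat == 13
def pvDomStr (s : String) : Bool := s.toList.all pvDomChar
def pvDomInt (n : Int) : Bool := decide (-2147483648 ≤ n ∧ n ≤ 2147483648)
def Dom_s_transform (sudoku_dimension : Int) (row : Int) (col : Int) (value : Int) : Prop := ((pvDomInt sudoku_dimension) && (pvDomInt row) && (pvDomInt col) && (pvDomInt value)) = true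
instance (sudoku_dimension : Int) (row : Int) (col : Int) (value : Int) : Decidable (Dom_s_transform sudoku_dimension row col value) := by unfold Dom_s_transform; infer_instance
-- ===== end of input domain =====

-- B drops the nested-loop s_map table (and its dict-of-dicts) and computes the hot column
-- in closed form (objective: simpler; same return value wherever A returns; B mutates only
-- its own fresh list, like A).


-- ===== PORT A =====
def s_transform (sudoku_dimension : Int) (row : Int) (col : Int) (value : Int) : List Int :=
  let result := PySem.List.pyRepeat [(0 : Int)] (sudoku_dimension ^ 4)
  let s_map : PySem.Dict Int (PySem.Dict Int Int) :=
    (PySem.List.pyRange 0 sudoku_dimension 1).foldl (fun sm i =>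
      let tmp : PySem.Dict Int Int :=
        (PySem.List.pyRange 0 sudoku_dimension 1).foldl
          (fun t j => t.insert j (i * sudoku_dimension + j)) PySem.Dict.empty
      sm.insert i tmp) PySem.Dict.empty
  -- s_map[row//d][col//d]: a missing key is Python's KeyError (outside Pre_)
  match (s_map.get? (PySem.Int.floordiv row sudoku_dimension)).bind
        (fun t => t.get? (PySem.Int.floordiv col sudoku_dimension)) with
  | none => result
  | some v => PySem.List.pySetD result (v * sudoku_dimension ^ 2 + value) 1

-- ===== PORT B =====
def s_transform_alt (sudoku_dimension : Int) (row : Int) (col : Int) (value : Int) : List Int :=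
  let square := PySem.Int.floordiv row sudoku_dimension * sudoku_dimension
      + PySem.Int.floordiv col sudoku_dimension
  -- result[...] = 1 : an out-of-range index is Python's IndexError (outside Pre_)
  PySem.List.pySetD (PySem.List.pyRepeat [(0 : Int)] (sudoku_dimension ^ 4))
    (square * sudoku_dimension ^ 2 + value) 1

-- ===== PRECONDITION & SPEC =====
-- Pre_ is exactly the set of inputs on which the Python A returns normally: d ≥ 1 (else range is
-- empty / d = 0 divides), the two block coordinates are existing s_map keys, and the final index is
-- in Python list-assignment range (negative in-range indices wrap in A; B wraps via the modulo).
-- d^4 < 2^63: for larger d CPython's '[0] * d**4' raises OverflowError (n > sys.maxsize) in both.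
def Pre_s_transform (sudoku_dimension : Int) (row : Int) (col : Int) (value : Int) : Prop :=
  1 ≤ sudoku_dimension ∧ sudoku_dimension ^ 4 < 2 ^ 63 ∧
  0 ≤ PySem.Int.floordiv row sudoku_dimension ∧ PySem.Int.floordiv row sudoku_dimension < sudoku_dimension ∧
  0 ≤ PySem.Int.floordiv col sudoku_dimension ∧ PySem.Int.floordiv col sudoku_dimension < sudoku_dimension ∧
  -(sudoku_dimension ^ 4) ≤ (PySem.Int.floordiv row sudoku_dimension * sudoku_dimension
      + PySem.Int.floordiv col sudoku_dimension) * sudoku_dimension ^ 2 + value ∧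
  (PySem.Int.floordiv row sudoku_dimension * sudoku_dimension
      + PySem.Int.floordiv col sudoku_dimension) * sudoku_dimension ^ 2 + value < sudoku_dimension ^ 4
instance (sudoku_dimension : Int) (row : Int) (col : Int) (value : Int) : Decidable (Pre_s_transform sudoku_dimension row col value) := by unfold Pre_s_transform; infer_instance

def pvWitness_s_transform : Int × Int × Int × Int := (2, 1, 1, 3)

def Spec_s_transform (sudoku_dimension : Int) (row : Int) (col : Int) (value : Int) (out : List Int) : Prop := out = s_transform_alt sudoku_dimension row col value
instance (sudoku_dimension : Int) (row : Int) (col : Int) (value : Int) (out : List Int) : Decidable (Spec_s_transform sudoku_dimension row col value out) := by unfold Spec_s_transform; infer_instance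

-- ===== CLAIM (what is proved, stated in full; the proofs are below) =====
def Claim_equal_s_transform : Prop := ∀ (sudoku_dimension : Int) (row : Int) (col : Int) (value : Int), Dom_s_transform sudoku_dimension row col value → Pre_s_transform sudoku_dimension row col value → Spec_s_transform sudoku_dimension row col value (s_transform sudoku_dimension row col value)

-- ===== LEMMAS AND PROOFS =====

-- A fold of inserts at keys the lookup key is not among leaves the lookup unchanged.
theorem get?_foldl_insert_not_mem {ν : Type} (l : List Int) (f : Int → ν)
    (d0 : PySem.Dict Int ν) (x : Int) (hx : x ∉ l) :
    (l.foldl (fun dd i => dd.insert i (f i)) d0).get? x = d0.get? x := by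
  induction l generalizing d0 with
  | nil => rfl
  | cons a t ih =>
    simp only [List.mem_cons, not_or] at hx
    simp only [List.foldl_cons]
    rw [ih _ hx.2, PySem.Dict.get?_insert_of_ne _ _ hx.1]

-- A fold of inserts whose value depends only on the key: lookup of a key in the (Nodup) list.
theorem get?_foldl_insert_mem {ν : Type} (l : List Int) (f : Int → ν)
    (d0 : PySem.Dict Int ν) (x : Int) (hx : x ∈ l) (hl : l.Nodup) :
    (l.foldl (fun dd i => dd.insert i (f i)) d0).get? x = some (f x) := by
  induction l generalizing d0 with
  | nil => cases hx
  | cons a t ih =>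
    simp only [List.foldl_cons]
    rcases List.mem_cons.mp hx with h | h
    · subst h
      rw [get?_foldl_insert_not_mem _ _ _ _ (List.nodup_cons.mp hl).1,
        PySem.Dict.get?_insert_self]
    · exact ih _ h (List.nodup_cons.mp hl).2

theorem s_transform_spec : Claim_equal_s_transform := by
  intro d row col value _ hpre
  obtain ⟨hd, -, hq0, hqd, hp0, hpd, -, -⟩ := hpre
  unfold Spec_s_transform s_transform s_transform_alt
  dsimp only
  have hmemq : PySem.Int.floordiv row d ∈ PySem.List.pyRange 0 d 1 :=
    (PySem.List.mem_pyRange_one).mpr ⟨hq0, hqd⟩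
  have hmemp : PySem.Int.floordiv col d ∈ PySem.List.pyRange 0 d 1 :=
    (PySem.List.mem_pyRange_one).mpr ⟨hp0, hpd⟩
  have hnd := PySem.List.nodup_pyRange_one (a := 0) (b := d)
  rw [get?_foldl_insert_mem _ _ _ _ hmemq hnd]
  simp only [Option.bind_some]
  rw [get?_foldl_insert_mem _ _ _ _ hmemp hnd]
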